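-- pv_equiv track=rewrite | github.com/bat-Syntra/risk | utils/risk_profile_system.py | get_profile_summary
-- ===== SOURCE A (Python) =====
-- from typing import Dict, List, Any, Optional
-- from enum import Enum
--
-- class RiskProfile(Enum):
--     CONSERVATIVE = "CONSERVATIVE"
--     BALANCED = "BALANCED"
--     AGGRESSIVE = "AGGRESSIVE"
--     LOTTERY = "LOTTERY"
--
-- def get_profile_summary(parlays: List[Dict[str, Any]]) -> Dict[str, int]:
--     """
--     Get count of parlays by risk profile
--     """
--     summary = {
--         RiskProfile.CONSERVATIVE.value: 0,
--         RiskProfile.BALANCED.value: 0,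
--         RiskProfile.AGGRESSIVE.value: 0,
--         RiskProfile.LOTTERY.value: 0
--     }
--
--     for parlay in parlays:
--         profile = parlay.get('risk_profile', RiskProfile.BALANCED.value)
--         if profile in summary:
--             summary[profile] += 1
--
--     return summary
-- ===== SOURCE B (Python) =====
-- from typing import Dict, List, Any
--
-- def get_profile_summary(parlays: List[Dict[str, Any]]) -> Dict[str, int]:
--     """Get count of parlays by risk profile (per-category counting passes)."""
--     profiles = ("CONSERVATIVE", "BALANCED", "AGGRESSIVE", "LOTTERY")
--     return {
--         p: sum(1 for parlay in parlays
--                if parlay.get('risk_profile', "BALANCED") == p)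
--         for p in profiles
--     }
-- ===== Notes on version B (the rewrite author's own statement) =====
-- stated objective: alternative
-- what changed: Replaces the single accumulating pass that increments a pre-initialised mutable dict with a dict comprehension over the four fixed profile names, each computed by an independent counting scan of the parlays list.
import Mathlib
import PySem

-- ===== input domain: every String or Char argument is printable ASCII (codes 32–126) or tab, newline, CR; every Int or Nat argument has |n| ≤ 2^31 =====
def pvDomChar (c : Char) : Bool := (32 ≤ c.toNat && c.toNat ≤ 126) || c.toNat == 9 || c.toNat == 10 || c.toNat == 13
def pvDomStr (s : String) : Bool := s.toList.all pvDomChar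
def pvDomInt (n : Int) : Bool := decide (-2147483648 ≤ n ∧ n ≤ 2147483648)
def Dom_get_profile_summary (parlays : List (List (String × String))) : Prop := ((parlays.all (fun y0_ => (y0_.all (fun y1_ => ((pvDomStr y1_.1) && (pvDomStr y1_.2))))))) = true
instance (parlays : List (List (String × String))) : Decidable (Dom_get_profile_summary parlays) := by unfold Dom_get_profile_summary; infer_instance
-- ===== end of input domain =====

-- B alternative: A does one accumulating pass over a pre-initialised mutable dict;
-- B instead maps over the four fixed profile names, counting each with its own scan.

-- parlay.get('risk_profile', 'BALANCED')  (dict argument = association list, first match)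
def pvProfile (parlay : List (String × String)) : String :=
  (PySem.Dict.mk parlay).getD "risk_profile" "BALANCED"

-- ===== PORT A =====
def get_profile_summary (parlays : List (List (String × String))) : List (String × Int) :=
  let summary : PySem.Dict String Int :=
    PySem.Dict.ofList [("CONSERVATIVE", 0), ("BALANCED", 0), ("AGGRESSIVE", 0), ("LOTTERY", 0)]
  let summary := parlays.foldl (fun summary parlay =>
    let profile := pvProfile parlay
    if summary.contains profile then
      summary.modify profile 0 (· + 1)
    else summary) summary
  summary.items

-- ===== PORT B =====
def get_profile_summary_alt (parlays : List (List (String × String))) : List (String × Int) :=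
  ["CONSERVATIVE", "BALANCED", "AGGRESSIVE", "LOTTERY"].map (fun p =>
    (p, parlays.foldl (fun acc parlay => if pvProfile parlay == p then acc + 1 else acc) (0 : Int)))

-- ===== PRECONDITION & SPEC =====
def Spec_get_profile_summary (parlays : List (List (String × String))) (out : List (String × Int)) : Prop := out = get_profile_summary_alt parlays
instance (parlays : List (List (String × String))) (out : List (String × Int)) : Decidable (Spec_get_profile_summary parlays out) := by unfold Spec_get_profile_summary; infer_instance

-- ===== CLAIM (what is proved, stated in full; the proofs are below) =====
def Claim_equal_get_profile_summary : Prop := ∀ (parlays : List (List (String × String))), Dom_get_profile_summary parlays → Spec_get_profile_summary parlays (get_profile_summary parlays)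

-- ===== LEMMAS AND PROOFS =====

def pvStep (d : PySem.Dict String Int) (parlay : List (String × String)) : PySem.Dict String Int :=
  if d.contains (pvProfile parlay) then d.modify (pvProfile parlay) 0 (· + 1) else d

theorem pv_keys_fold (l : List (List (String × String))) (d : PySem.Dict String Int) :
    (l.foldl pvStep d).keys = d.keys := by
  induction l generalizing d with
  | nil => rfl
  | cons q l ih =>
    simp only [List.foldl_cons]
    rw [ih]
    unfold pvStep
    split_ifs with h
    · rw [PySem.Dict.keys_modify, PySem.Dict.keys_insert_of_contains _ _ h]
    · rfl

theorem pv_getD_fold (l : List (List (String × String))) (d : PySem.Dict String Int)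
    (k0 : String) (h : d.contains k0 = true) :
    (l.foldl pvStep d).getD k0 0 = d.getD k0 0 + ((l.countP (fun q => pvProfile q == k0) : Nat) : Int) := by
  induction l generalizing d with
  | nil => simp
  | cons q l ih =>
    simp only [List.foldl_cons, List.countP_cons]
    have hk : (pvStep d q).contains k0 = true := by
      unfold pvStep
      split_ifs with hc
      · rw [PySem.Dict.contains_modify]; simp [h]
      · exact h
    rw [ih _ hk]
    by_cases hq : pvProfile q = k0
    · subst hq
      simp only [BEq.rfl, if_true]
      unfold pvStep
      rw [if_pos h, PySem.Dict.getD_modify_self]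
      push_cast
      ring
    · have hb : (pvProfile q == k0) = false := by simp [hq]
      simp only [hb, Bool.false_eq_true, if_false, Nat.add_zero]
      unfold pvStep
      split_ifs with hc
      · rw [PySem.Dict.getD_modify_of_ne _ _ _ (fun e => hq e.symm)]
      · rfl

theorem pv_count_fold (l : List (List (String × String))) (p : String) (n : Int) :
    l.foldl (fun acc parlay => if pvProfile parlay == p then acc + 1 else acc) n
      = n + ((l.countP (fun q => pvProfile q == p) : Nat) : Int) := by
  induction l generalizing n with
  | nil => simp
  | cons q l ih =>
    simp only [List.foldl_cons, List.countP_cons]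
    by_cases hq : (pvProfile q == p) = true
    · rw [if_pos hq, ih]; simp [hq]; ring
    · rw [if_neg hq, ih]; simp at hq; simp [hq]

-- ===== VERDICT (by name: the statement is the Claim_ definition above) =====
theorem get_profile_summary_spec : Claim_equal_get_profile_summary := by
  intro parlays _
  unfold Spec_get_profile_summary get_profile_summary get_profile_summary_alt
  set d0 : PySem.Dict String Int :=
    PySem.Dict.ofList [("CONSERVATIVE", 0), ("BALANCED", 0), ("AGGRESSIVE", 0), ("LOTTERY", 0)] with hd0
  have hfold : (parlays.foldl (fun summary parlay =>
      let profile := pvProfile parlay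
      if summary.contains profile then summary.modify profile 0 (· + 1) else summary) d0)
      = parlays.foldl pvStep d0 := rfl
  simp only [hfold]
  have hkeys : (parlays.foldl pvStep d0).keys = ["CONSERVATIVE", "BALANCED", "AGGRESSIVE", "LOTTERY"] := by
    rw [pv_keys_fold]; decide
  have hnd : (parlays.foldl pvStep d0).keys.Nodup := by rw [hkeys]; decide
  rw [PySem.Dict.items_eq_map_keys _ hnd 0, hkeys]
  simp only [List.map_cons, List.map_nil]
  rw [pv_getD_fold _ _ _ (by decide), pv_getD_fold _ _ _ (by decide),
      pv_getD_fold _ _ _ (by decide), pv_getD_fold _ _ _ (by decide),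
      pv_count_fold, pv_count_fold, pv_count_fold, pv_count_fold]
  norm_num [hd0]
  refine ⟨?_, ?_, ?_, ?_⟩ <;> decide
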